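-- pv_equiv track=rewrite | github.com/m0ai/AlgorithmPractice | pseudo-isomorphic/solve.py | pseudoIsomorphicSubstrings
-- ===== SOURCE A (Python) =====
-- def pseudoIsomorphicSubstrings(s):
--     len_each_case = list()
--     cases = set(list())
--     for cur_index in range(1, len(s)+1):
--
--         cases = set(list())
--         splited_str = s[:cur_index]
--         learned_pattern = list()
--
--
--         str_len = len(splited_str)
--         for read_length in range(1,str_len+1):
--             for index in range(str_len):
--                 if index + read_length > str_len:
--                     break
--
--
--                 char = splited_str[index:index+read_length]
--                 parsed_pattern = list()
--                 pattern_match_dict = {}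
--                 new_pattern = 0
--                 for c in char:
--                     if c not in pattern_match_dict:
--                         pattern_match_dict[c] = new_pattern
--                         new_pattern += 1
--                     parsed_pattern.append(pattern_match_dict[c])
--
--                 if parsed_pattern not in learned_pattern:
--                     learned_pattern.append(parsed_pattern)
--                     cases.add(char)
--
--         len_each_case.append(len(cases))
--     return len_each_case
-- ===== SOURCE B (Python) =====
-- def pseudoIsomorphicSubstrings(s):
--     # Incremental: for each new prefix end i, only substrings ending at i are new;
--     # keep one persistent set of canonical isomorphism patterns across prefixes.
--     seen = set()
--     result = []
--     for end in range(1, len(s) + 1):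
--         for start in range(end):
--             mapping = {}
--             pattern = []
--             for c in s[start:end]:
--                 if c not in mapping:
--                     mapping[c] = len(mapping)
--                 pattern.append(mapping[c])
--             seen.add(tuple(pattern))
--         result.append(len(seen))
--     return result
-- ===== Notes on version B (the rewrite author's own statement) =====
-- stated objective: faster
-- what changed: A recomputes, for every prefix, the canonical isomorphism pattern of every substring of that prefix from scratch (with a linear-scan 'learned_pattern' list membership test); B keeps one persistent set of hashed pattern tuples across prefixes and, for each new prefix end, canonicalises only the substrings ending at that position.
import Mathlib
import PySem

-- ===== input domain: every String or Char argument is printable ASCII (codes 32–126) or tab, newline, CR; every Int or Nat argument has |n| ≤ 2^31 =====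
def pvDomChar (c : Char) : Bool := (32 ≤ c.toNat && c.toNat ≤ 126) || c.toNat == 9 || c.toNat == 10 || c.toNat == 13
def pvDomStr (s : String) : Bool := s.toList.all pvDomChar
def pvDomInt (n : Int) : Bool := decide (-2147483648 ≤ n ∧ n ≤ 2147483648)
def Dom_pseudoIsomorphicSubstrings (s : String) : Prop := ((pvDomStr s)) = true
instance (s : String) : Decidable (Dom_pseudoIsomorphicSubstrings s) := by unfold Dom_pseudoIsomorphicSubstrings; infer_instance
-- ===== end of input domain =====

-- B recomputes nothing per prefix: it keeps ONE persistent set of canonical patterns and, for prefix end e,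
-- canonicalises only the substrings ending at e, while A re-enumerates every substring of every prefix.

-- ===== PORT A =====
-- A's innermost 'for c in char' loop: dict pattern_match_dict + counter new_pattern, appending pattern_match_dict[c]
def pvPatternA (chars : List Char) : List Int :=
  (chars.foldl
    (fun (st : List Int × PySem.Dict Char Int × Int) c =>
      if (st.2.1).contains c then (st.1 ++ [(st.2.1).getD c 0], st.2.1, st.2.2)
      else (st.1 ++ [(st.2.1.insert c st.2.2).getD c 0], st.2.1.insert c st.2.2, st.2.2 + 1))
    ([], PySem.Dict.empty, 0)).1

-- A's per-prefix body: the two nested loops over read_length and index (the 'break' is the Bool flag),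
-- accumulating (cases, learned_pattern) and returning len(cases)
def pvCasesLenA (splited : List Char) : Int :=
  let strLen := splited.length
  let final :=
    (PySem.List.pyRange 1 ((strLen : Int) + 1)).foldl
      (fun (st : PySem.Set (List Char) × List (List Int)) readLength =>
        ((PySem.List.pyRange 0 (strLen : Int)).foldl
            (fun (st2 : Bool × PySem.Set (List Char) × List (List Int)) index =>
              if st2.1 = true then st2                                        -- after the 'break'
              else if index + readLength > (strLen : Int) then (true, st2.2)  -- the 'break'
              else
                (st2.1,
                 let char := PySem.List.slice splited (some index) (some (index + readLength))
                 let parsed := pvPatternA char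
                 if parsed ∈ st2.2.2 then st2.2
                 else (PySem.Set.add st2.2.1 char, st2.2.2 ++ [parsed])))
            (false, st)).2)
      (PySem.Set.empty, [])
  PySem.Set.len final.1

def pseudoIsomorphicSubstrings (s : String) : List Int :=
  let cs := s.toList
  (PySem.List.pyRange 1 ((cs.length : Int) + 1)).foldl
    (fun acc curIndex => acc ++ [pvCasesLenA (PySem.List.slice cs none (some curIndex))])
    []

-- ===== PORT B =====
-- B's canonical pattern: mapping[c] = len(mapping) on first sight, then append mapping[c]
def pvPatternB (chars : List Char) : List Int :=
  (chars.foldl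
    (fun (st : PySem.Dict Char Int × List Int) c =>
      match (st.1).get? c with
      | none => ((st.1).insert c (PySem.Dict.size st.1 : Int), st.2 ++ [(PySem.Dict.size st.1 : Int)])
      | some v => (st.1, st.2 ++ [v]))
    (PySem.Dict.empty, [])).2

def pseudoIsomorphicSubstrings_alt (s : String) : List Int :=
  let cs := s.toList
  ((PySem.List.pyRange 1 ((cs.length : Int) + 1)).foldl
      (fun (st : PySem.Set (List Int) × List Int) e =>
        let seen :=
          (PySem.List.pyRange 0 e).foldl
            (fun seen j => PySem.Set.add seen (pvPatternB (PySem.List.slice cs (some j) (some e))))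
            st.1
        (seen, st.2 ++ [PySem.Set.len seen]))
      (PySem.Set.empty, [])).2

-- ===== PRECONDITION & SPEC =====
def Spec_pseudoIsomorphicSubstrings (s : String) (out : List Int) : Prop := out = pseudoIsomorphicSubstrings_alt s
instance (s : String) (out : List Int) : Decidable (Spec_pseudoIsomorphicSubstrings s out) := by unfold Spec_pseudoIsomorphicSubstrings; infer_instance

-- ===== CLAIM (what is proved, stated in full; the proofs are below) =====
def Claim_equal_pseudoIsomorphicSubstrings : Prop := ∀ (s : String), Dom_pseudoIsomorphicSubstrings s → Spec_pseudoIsomorphicSubstrings s (pseudoIsomorphicSubstrings s)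

-- ===== LEMMAS AND PROOFS =====

-- the two canonicalisers agree: A's running counter new_pattern always equals the size of its dict
lemma patAB_aux (cs : List Char) : ∀ (parsed : List Int) (d : PySem.Dict Char Int),
    (cs.foldl
      (fun (st : List Int × PySem.Dict Char Int × Int) c =>
        if (st.2.1).contains c then (st.1 ++ [(st.2.1).getD c 0], st.2.1, st.2.2)
        else (st.1 ++ [(st.2.1.insert c st.2.2).getD c 0], st.2.1.insert c st.2.2, st.2.2 + 1))
      (parsed, d, (d.size : Int))).1
    = (cs.foldl
        (fun (st : PySem.Dict Char Int × List Int) c =>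
          match (st.1).get? c with
          | none => ((st.1).insert c (PySem.Dict.size st.1 : Int), st.2 ++ [(PySem.Dict.size st.1 : Int)])
          | some v => (st.1, st.2 ++ [v]))
        (d, parsed)).2 := by
  induction cs with
  | nil => intro parsed d; rfl
  | cons c cs ih =>
    intro parsed d
    simp only [List.foldl_cons]
    rcases hc : d.get? c with _ | v
    · have hcon : d.contains c = false := by
        rw [PySem.Dict.contains_eq_isSome_get?, hc]; rfl
      have hsz : (d.insert c (d.size : Int)).size = d.size + 1 := by
        rw [PySem.Dict.size_insert, hcon]; simp
      rw [show (if d.contains c = true then (parsed ++ [d.getD c 0], d, ((d.size : Nat) : Int))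
            else (parsed ++ [(d.insert c (d.size : Int)).getD c 0], d.insert c (d.size : Int), ((d.size : Nat) : Int) + 1))
          = (parsed ++ [((d.size : Nat) : Int)], d.insert c (d.size : Int), ((d.size : Nat) : Int) + 1) from by
        rw [hcon]; simp [PySem.Dict.getD_insert_self]]
      have := ih (parsed ++ [(d.size : Int)]) (d.insert c (d.size : Int))
      rw [hsz, Nat.cast_add, Nat.cast_one] at this
      exact this
    · have hcon : d.contains c = true := by
        rw [PySem.Dict.contains_eq_isSome_get?, hc]; rfl
      have hgd : d.getD c 0 = v := PySem.Dict.getD_of_get?_eq_some d 0 hc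
      rw [show (if d.contains c = true then (parsed ++ [d.getD c 0], d, ((d.size : Nat) : Int))
            else (parsed ++ [(d.insert c (d.size : Int)).getD c 0], d.insert c (d.size : Int), ((d.size : Nat) : Int) + 1))
          = (parsed ++ [v], d, ((d.size : Nat) : Int)) from by rw [hcon, hgd]; simp]
      exact ih (parsed ++ [v]) d

lemma pvPatternA_eq_pvPatternB (chars : List Char) : pvPatternA chars = pvPatternB chars := by
  unfold pvPatternA pvPatternB
  have := patAB_aux chars [] PySem.Dict.empty
  simpa using this

-- generic elimination of the ported break flag: a foldl with a stop flag is a foldl over the takeWhile prefix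
lemma pvBreakFold_stopped {α σ : Type} (cond : α → Prop) [DecidablePred cond] (f : σ → α → σ) :
    ∀ (l : List α) (st : σ),
      l.foldl
        (fun (p : Bool × σ) x =>
          if p.1 = true then p else if cond x then (true, p.2) else (p.1, f p.2 x))
        (true, st) = (true, st) := by
  intro l
  induction l with
  | nil => intro st; rfl
  | cons x l ih => intro st; simp only [List.foldl_cons]; exact ih st

lemma pvBreakFold {α σ : Type} (cond : α → Prop) [DecidablePred cond] (f : σ → α → σ) :
    ∀ (l : List α) (st : σ),
      (l.foldl
        (fun (p : Bool × σ) x =>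
          if p.1 = true then p else if cond x then (true, p.2) else (p.1, f p.2 x))
        (false, st)).2
      = (l.takeWhile (fun x => !decide (cond x))).foldl f st := by
  intro l
  induction l with
  | nil => intro st; rfl
  | cons x l ih =>
    intro st
    by_cases hx : cond x
    · rw [List.takeWhile_cons_of_neg (p := fun x => !decide (cond x)) (by simp [hx])]
      simp only [List.foldl_cons, Bool.false_eq_true, if_false, if_pos hx, List.foldl_nil]
      rw [pvBreakFold_stopped]
    · rw [List.takeWhile_cons_of_pos (p := fun x => !decide (cond x)) (by simp [hx])]
      simp only [List.foldl_cons, Bool.false_eq_true, if_false, if_neg hx]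
      exact ih (f st x)

-- pure step of A's dedup-and-collect loop over one substring
def pvStepA (st : PySem.Set (List Char) × List (List Int)) (sub : List Char) :
    PySem.Set (List Char) × List (List Int) :=
  (if pvPatternB sub ∈ st.2 then st.1 else PySem.Set.add st.1 sub,
   if pvPatternB sub ∈ st.2 then st.2 else st.2 ++ [pvPatternB sub])

lemma pvStepA_snd (L : List (List Char)) :
    ∀ (cases : PySem.Set (List Char)) (learned : List (List Int)),
      (L.foldl pvStepA (cases, learned)).2 = PySem.Set.update learned (L.map pvPatternB) := by
  induction L with
  | nil => intro cases learned; simp [PySem.Set.update]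
  | cons sub L ih =>
    intro cases learned
    simp only [List.foldl_cons, List.map_cons, PySem.Set.update_cons]
    rw [ih]
    congr 1
    rw [PySem.Set.add_eq_ite]
    unfold pvStepA
    split_ifs <;> rfl

lemma pvStepA_count (L : List (List Char)) :
    ∀ (cases : PySem.Set (List Char)) (learned : List (List Int)),
      learned.Nodup → cases.Nodup → (∀ x ∈ cases, pvPatternB x ∈ learned) →
      (L.foldl pvStepA (cases, learned)).1.length + learned.length
        = (L.foldl pvStepA (cases, learned)).2.length + cases.length := by
  induction L with
  | nil => intro cases learned _ _ _; simp; omega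
  | cons sub L ih =>
    intro cases learned hnd hcnd hinv
    simp only [List.foldl_cons]
    by_cases hm : pvPatternB sub ∈ learned
    · rw [show pvStepA (cases, learned) sub = (cases, learned) from by
        unfold pvStepA; simp [hm]]
      exact ih cases learned hnd hcnd hinv
    · have hsub : sub ∉ cases := fun hx => hm (hinv sub hx)
      rw [show pvStepA (cases, learned) sub
          = (cases ++ [sub], learned ++ [pvPatternB sub]) from by
        unfold pvStepA; simp [hm, PySem.Set.add_of_not_mem hsub]]
      have h1 := ih (cases ++ [sub]) (learned ++ [pvPatternB sub])
        (List.Nodup.append hnd (List.nodup_singleton _) (fun a ha hb => hm ((List.mem_singleton.1 hb) ▸ ha)))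
        (List.Nodup.append hcnd (List.nodup_singleton _) (fun a ha hb => hsub ((List.mem_singleton.1 hb) ▸ ha)))
        (by intro x hx
            rcases List.mem_append.1 hx with h | h
            · exact List.mem_append_left _ (hinv x h)
            · simp at h; simp [h])
      simp only [List.length_append, List.length_cons, List.length_nil] at h1 ⊢
      omega

-- the canonical patterns of all nonempty substrings of cs[:i], in B's enumeration order (by end, then start)
def pvPats (cs : List Char) (i : Nat) : List (List Int) :=
  (List.range i).flatMap
    (fun e => (List.range (e + 1)).map (fun j => pvPatternB ((cs.drop j).take (e + 1 - j))))

lemma mem_pvPats (cs : List Char) (i : Nat) (q : List Int) :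
    q ∈ pvPats cs i ↔ ∃ j l : Nat, 1 ≤ l ∧ j + l ≤ i ∧ q = pvPatternB ((cs.drop j).take l) := by
  simp only [pvPats, List.mem_flatMap, List.mem_map, List.mem_range]
  constructor
  · rintro ⟨e, he, j, hj, rfl⟩
    refine ⟨j, e + 1 - j, by omega, by omega, rfl⟩
  · rintro ⟨j, l, hl, hil, rfl⟩
    refine ⟨j + l - 1, by omega, j, by omega, ?_⟩
    have h : j + l - 1 + 1 - j = l := by omega
    rw [h]

lemma pvTakeWhileRange (m rl : Nat) (h1 : 1 ≤ rl) (h2 : rl ≤ m) :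
    (PySem.List.pyRange 0 (m : Int)).takeWhile
        (fun x => !decide (x + (rl : Int) > (m : Int)))
      = PySem.List.pyRange 0 ((m - rl + 1 : Nat) : Int) := by
  have hsplit := PySem.List.pyRange_one_append 0 ((m - rl + 1 : Nat) : Int) (m : Int)
    (by positivity) (by exact_mod_cast Nat.le_of_lt_succ (by omega))
  rw [hsplit, List.takeWhile_append]
  have hall : (PySem.List.pyRange 0 ((m - rl + 1 : Nat) : Int)).takeWhile
      (fun x => !decide (x + (rl : Int) > (m : Int)))
      = PySem.List.pyRange 0 ((m - rl + 1 : Nat) : Int) := by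
    rw [List.takeWhile_eq_self_iff]
    intro x hx
    rw [PySem.List.mem_pyRange_one] at hx
    simp only [Bool.not_eq_eq_eq_not, Bool.not_true, decide_eq_false_iff_not, not_lt]
    omega
  rw [hall, if_pos rfl]
  suffices h' : (PySem.List.pyRange ((m - rl + 1 : Nat) : Int) (m : Int)).takeWhile
      (fun x => !decide (x + (rl : Int) > (m : Int))) = [] by
    rw [h']; simp
  rcases Nat.lt_or_ge (m - rl + 1) m with h | h
  · rw [PySem.List.pyRange_one_cons (by exact_mod_cast h)]
    have hgt : ((m - rl + 1 : Nat) : Int) + rl > m := by exact_mod_cast (by omega : m < (m - rl + 1) + rl)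
    rw [List.takeWhile_cons_of_neg (by simp only [Bool.not_eq_true', decide_eq_false_iff_not, not_lt, not_le]; push_cast at hgt ⊢; omega)]
  · rw [PySem.List.pyRange_one_eq_nil (Nat.cast_le.2 h)]
    rfl

-- the list of all nonempty substrings of p, in A's enumeration order (by length, then start)
def pvAllA (p : List Char) : List (List Char) :=
  (List.range p.length).flatMap
    (fun r => (List.range (p.length - r)).map (fun j => (p.drop j).take (r + 1)))

lemma pvStepA_eq_ite (s : PySem.Set (List Char) × List (List Int)) (sub : List Char) :
    (if pvPatternB sub ∈ s.2 then s else (PySem.Set.add s.1 sub, s.2 ++ [pvPatternB sub]))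
      = pvStepA s sub := by
  unfold pvStepA; split_ifs <;> rfl

lemma pvCasesLenA_eq_gen (p : List Char) :
    pvCasesLenA p = ((PySem.Set.ofList ((pvAllA p).map pvPatternB)).length : Int) := by
  have hrow : ∀ (r : Nat), r < p.length → ∀ (st : PySem.Set (List Char) × List (List Int)),
      ((PySem.List.pyRange 0 (p.length : Int)).foldl
        (fun (st2 : Bool × PySem.Set (List Char) × List (List Int)) index =>
          if st2.1 = true then st2
          else if index + ((1 : Int) + (r : Int)) > (p.length : Int) then (true, st2.2)
          else
            (st2.1,
             let char := PySem.List.slice p (some index) (some (index + ((1 : Int) + (r : Int))))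
             let parsed := pvPatternA char
             if parsed ∈ st2.2.2 then st2.2
             else (PySem.Set.add st2.2.1 char, st2.2.2 ++ [parsed])))
        (false, st)).2
      = ((List.range (p.length - r)).map (fun j => (p.drop j).take (r + 1))).foldl pvStepA st := by
    intro r hr st
    have hcast : (1 : Int) + (r : Int) = ((r + 1 : Nat) : Int) := by push_cast; ring
    rw [hcast]
    rw [pvBreakFold (cond := fun x => x + ((r + 1 : Nat) : Int) > (p.length : Int))
        (f := fun (s : PySem.Set (List Char) × List (List Int)) index =>
          let char := PySem.List.slice p (some index) (some (index + ((r + 1 : Nat) : Int)))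
          let parsed := pvPatternA char
          if parsed ∈ s.2 then s
          else (PySem.Set.add s.1 char, s.2 ++ [parsed]))]
    rw [pvTakeWhileRange p.length (r + 1) (by omega) (by omega)]
    have hmr : p.length - (r + 1) + 1 = p.length - r := by omega
    rw [hmr, PySem.List.pyRange_zero_natCast, List.foldl_map, List.foldl_map]
    simp only [PySem.List.slice_natCast_add, pvPatternA_eq_pvPatternB, pvStepA_eq_ite]
  calc pvCasesLenA p
      = PySem.Set.len ((List.range p.length).foldl
          (fun st r =>
            ((List.range (p.length - r)).map (fun j => (p.drop j).take (r + 1))).foldl pvStepA st)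
          (PySem.Set.empty, [])).1 := by
        simp only [pvCasesLenA]
        rw [PySem.List.pyRange_one 1 ((p.length : Int) + 1),
          show ((p.length : Int) + 1 - 1).toNat = p.length from by simp, List.foldl_map]
        congr 2
        exact PySem.List.foldl_congr_mem _ _ _ _ (fun acc x hx => hrow x (List.mem_range.1 hx) acc)
    _ = PySem.Set.len ((pvAllA p).foldl pvStepA (PySem.Set.empty, [])).1 := by
        rw [pvAllA, ← List.foldl_flatMap]
    _ = ((PySem.Set.ofList ((pvAllA p).map pvPatternB)).length : Int) := by
        have hc := pvStepA_count (pvAllA p) PySem.Set.empty [] List.nodup_nil List.nodup_nil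
          (by intro x hx; simp [PySem.Set.empty] at hx)
        have hs := pvStepA_snd (pvAllA p) PySem.Set.empty []
        rw [PySem.Set.update_nil_left] at hs
        simp only [PySem.Set.len]
        rw [hs] at hc
        simp only [List.length_nil, Nat.add_zero] at hc
        exact_mod_cast hc

lemma pvCasesLenA_eq (cs : List Char) (i : Nat) (hi : i ≤ cs.length) :
    pvCasesLenA (cs.take i) = ((PySem.Set.ofList (pvPats cs i)).length : Int) := by
  rw [pvCasesLenA_eq_gen]
  congr 1
  apply List.Perm.length_eq
  rw [List.perm_ext_iff_of_nodup (PySem.Set.nodup_ofList _) (PySem.Set.nodup_ofList _)]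
  intro q
  rw [PySem.Set.mem_ofList, PySem.Set.mem_ofList, mem_pvPats]
  have hlen : (cs.take i).length = i := by rw [List.length_take]; omega
  constructor
  · intro hq
    rw [List.mem_map] at hq
    obtain ⟨sub, hsub, rfl⟩ := hq
    rw [pvAllA, List.mem_flatMap] at hsub
    obtain ⟨r, hr, hsub⟩ := hsub
    rw [List.mem_map] at hsub
    obtain ⟨j, hj, rfl⟩ := hsub
    rw [List.mem_range, hlen] at hr hj
    refine ⟨j, r + 1, by omega, by omega, ?_⟩
    rw [List.drop_take, List.take_take,
      show min (r + 1) (i - j) = r + 1 from by omega]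
  · rintro ⟨j, l, hl, hil, rfl⟩
    rw [List.mem_map]
    refine ⟨List.take (l - 1 + 1) (List.drop j (List.take i cs)), ?_, ?_⟩
    · rw [pvAllA, List.mem_flatMap]
      refine ⟨l - 1, by rw [List.mem_range, hlen]; omega, ?_⟩
      rw [List.mem_map]
      exact ⟨j, by rw [List.mem_range, hlen]; omega, rfl⟩
    · rw [List.drop_take, List.take_take,
        show min (l - 1 + 1) (i - j) = l from by omega]

-- B's port produces exactly those counts, prefix by prefix
lemma alt_aux (cs : List Char) (k : Nat) :
    (PySem.List.pyRange 1 ((k : Int) + 1)).foldl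
        (fun (st : PySem.Set (List Int) × List Int) e =>
          let seen :=
            (PySem.List.pyRange 0 e).foldl
              (fun seen j => PySem.Set.add seen (pvPatternB (PySem.List.slice cs (some j) (some e))))
              st.1
          (seen, st.2 ++ [PySem.Set.len seen]))
        (PySem.Set.empty, [])
      = (PySem.Set.ofList (pvPats cs k),
         (List.range k).map (fun e => ((PySem.Set.ofList (pvPats cs (e + 1))).length : Int))) := by
  induction k with
  | zero =>
    rw [PySem.List.pyRange_one_eq_nil (by omega)]
    rfl
  | succ k ih =>
    rw [show ((k + 1 : Nat) : Int) + 1 = ((k : Int) + 1) + 1 from by push_cast; ring,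
      PySem.List.pyRange_one_succ_right (by omega), List.foldl_append, ih]
    have hrow : pvPats cs (k + 1)
        = pvPats cs k ++ (List.range (k + 1)).map (fun j => pvPatternB (List.take (k + 1 - j) (List.drop j cs))) := by
      conv_lhs => rw [pvPats, List.range_succ, List.flatMap_append]
      rw [pvPats]
      simp
    have hseen : (PySem.List.pyRange 0 ((k : Int) + 1)).foldl
        (fun seen j => PySem.Set.add seen (pvPatternB (PySem.List.slice cs (some j) (some ((k : Int) + 1)))))
        (PySem.Set.ofList (pvPats cs k))
        = PySem.Set.ofList (pvPats cs (k + 1)) := by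
      rw [show ((k : Int) + 1) = ((k + 1 : Nat) : Int) from by push_cast; ring,
        PySem.List.pyRange_zero_natCast, List.foldl_map]
      simp only [PySem.List.slice_natCast]
      rw [← PySem.Set.update_map_eq_foldl_add (List.range (k + 1))
            (fun j => pvPatternB (List.take (k + 1 - j) (List.drop j cs))),
        ← PySem.Set.ofList_append, ← hrow]
    simp only [List.foldl_cons, List.foldl_nil]
    rw [hseen, List.range_succ, List.map_append]
    simp [PySem.Set.len]

-- B's port produces exactly those counts, prefix by prefix
lemma alt_eq (s : String) :
    pseudoIsomorphicSubstrings_alt s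
      = (List.range s.toList.length).map
          (fun k => ((PySem.Set.ofList (pvPats s.toList (k + 1))).length : Int)) := by
  simp only [pseudoIsomorphicSubstrings_alt]
  rw [alt_aux s.toList s.toList.length]

-- A's port produces the same list
lemma a_eq (s : String) :
    pseudoIsomorphicSubstrings s
      = (List.range s.toList.length).map
          (fun k => ((PySem.Set.ofList (pvPats s.toList (k + 1))).length : Int)) := by
  simp only [pseudoIsomorphicSubstrings]
  rw [PySem.List.foldl_append_singleton_eq_map, List.nil_append,
    PySem.List.pyRange_one 1 ((s.toList.length : Int) + 1),
    show ((s.toList.length : Int) + 1 - 1).toNat = s.toList.length from by simp,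
    List.map_map]
  apply List.map_congr_left
  intro k hk
  rw [List.mem_range] at hk
  simp only [Function.comp]
  rw [show (1 : Int) + (k : Int) = ((k + 1 : Nat) : Int) from by push_cast; ring,
    PySem.List.slice_to_natCast]
  exact pvCasesLenA_eq s.toList (k + 1) (by omega)

-- ===== VERDICT (by name: the statement is the Claim_ definition above) =====
theorem pseudoIsomorphicSubstrings_spec : Claim_equal_pseudoIsomorphicSubstrings := by
  intro s _
  unfold Spec_pseudoIsomorphicSubstrings
  rw [a_eq, alt_eq]
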